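-- pv_equiv track=rewrite | github.com/simjh96/WebDev | time_gap/score_match.py | solution
-- ===== SOURCE A (Python) =====
-- def score(a, b, c, n):
--   return ((10**9)*(2*a+2*b+c))//(2*n) + a
--
-- def solution(n, s):
--   # binary search with b
--   left = -1
--   right = n+1
--   result = None
--
--   while left <= right:
--     mid = (left + right) // 2
--     # 10**9 가 너무 큰 수라서 다른 b 의 boundary가 겹칠 일이 없음
--     u_bound = score(0, mid, 0, n) + mid
--     l_bound = score(0, mid-1, 1, n)
--     m_bound = score(0, mid, 0, n)
--
--     if s < l_bound:
--       right = mid - 1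
--
--     elif s > u_bound:
--       left = mid + 1
--
--     else:   # in boundary L <= s <= U
--       if s >= m_bound:
--         result = [s - m_bound, mid - (s - m_bound), 0]
--       else:
--         if s <= l_bound + mid - 1:
--           result = [s - l_bound, mid - 1 - (s - l_bound), 1]
--       break
--
--   if result is not None:
--     a, b, c = result
--     return f"{2*a+2*b+c} {a}"
--
--   else:
--     return "-1"
-- ===== SOURCE B (Python) =====
-- def solution(n, s):
--     # recursive binary search returning the (total, a) pair directly;
--     # score(0,m,0,n) and score(0,m-1,1,n) reduced to single floor divisions
--     def go(lo, hi):
--         if lo > hi: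
--             return None
--         mid = (lo + hi) // 2
--         m = (1000000000 * mid) // n          # == score(0, mid, 0, n)
--         l = (1000000000 * mid - 500000000) // n  # == score(0, mid-1, 1, n)
--         if s < l:
--             return go(lo, mid - 1)
--         if s > m + mid:
--             return go(mid + 1, hi)
--         if s >= m:
--             return (2 * mid, s - m)
--         if s <= l + mid - 1:
--             return (2 * mid - 1, s - l)
--         return None
--     r = go(-1, n + 1)
--     return "-1" if r is None else f"{r[0]} {r[1]}"
-- ===== Notes on version B (the rewrite author's own statement) =====
-- stated objective: simpler
-- what changed: The while loop mutating left/right/result plus the score helper and end-of-loop unpacking/formatting is replaced by a recursive descent that returns the (total, a) output pair directly, with score(0,mid,0,n) and score(0,mid-1,1,n) algebraically reduced to single floor divisions (10^9*mid)//n and (10^9*mid-5*10^8)//n.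
import Mathlib
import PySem

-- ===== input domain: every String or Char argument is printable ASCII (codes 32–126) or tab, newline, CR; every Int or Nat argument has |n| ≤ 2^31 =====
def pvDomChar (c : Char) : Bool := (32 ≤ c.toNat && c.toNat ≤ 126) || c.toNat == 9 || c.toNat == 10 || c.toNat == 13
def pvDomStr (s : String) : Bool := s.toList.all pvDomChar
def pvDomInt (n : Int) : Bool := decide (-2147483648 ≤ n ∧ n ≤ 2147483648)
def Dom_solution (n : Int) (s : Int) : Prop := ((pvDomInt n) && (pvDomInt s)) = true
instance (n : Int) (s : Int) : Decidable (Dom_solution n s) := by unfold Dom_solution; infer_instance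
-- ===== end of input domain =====

-- B replaces A's mutating while loop with a recursive descent returning the output pair directly,
-- with the two score(...) calls algebraically reduced to single floor divisions (objective: simpler).

-- ===== PORT A =====
-- score(a, b, c, n)
def score (a : Int) (b : Int) (c : Int) (n : Int) : Int :=
  PySem.Int.floordiv ((10 ^ 9) * (2 * a + 2 * b + c)) (2 * n) + a

-- the while loop of A: state (left, right), returns the final `result`
def solutionLoop (n : Int) (s : Int) (left : Int) (right : Int) :
    Option (Int × Int × Int) :=
  if _h : left ≤ right then
    let mid := PySem.Int.floordiv (left + right) 2
    let u_bound := score 0 mid 0 n + mid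
    let l_bound := score 0 (mid - 1) 1 n
    let m_bound := score 0 mid 0 n
    if s < l_bound then
      solutionLoop n s left (mid - 1)
    else if s > u_bound then
      solutionLoop n s (mid + 1) right
    else
      if s ≥ m_bound then
        some (s - m_bound, mid - (s - m_bound), 0)
      else
        if s ≤ l_bound + mid - 1 then
          some (s - l_bound, mid - 1 - (s - l_bound), 1)
        else
          none
  else
    none
termination_by (right - left + 2).toNat
decreasing_by
  · have := PySem.Int.floordiv_two_mid_bounds _h
    simp only [PySem.Int.floordiv] at *
    omega
  · have := PySem.Int.floordiv_two_mid_bounds _h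
    simp only [PySem.Int.floordiv] at *
    omega

def solution (n : Int) (s : Int) : String :=
  match solutionLoop n s (-1) (n + 1) with
  | some (a, b, c) => PySem.Int.toStr (2 * a + 2 * b + c) ++ " " ++ PySem.Int.toStr a
  | none => "-1"

-- ===== PORT B =====
-- the recursive helper `go` of Source B
def solutionGo (n : Int) (s : Int) (lo : Int) (hi : Int) : Option (Int × Int) :=
  if _h : lo > hi then
    none
  else
    let mid := PySem.Int.floordiv (lo + hi) 2
    let m := PySem.Int.floordiv (1000000000 * mid) n
    let l := PySem.Int.floordiv (1000000000 * mid - 500000000) n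
    if s < l then
      solutionGo n s lo (mid - 1)
    else if s > m + mid then
      solutionGo n s (mid + 1) hi
    else if s ≥ m then
      some (2 * mid, s - m)
    else if s ≤ l + mid - 1 then
      some (2 * mid - 1, s - l)
    else
      none
termination_by (hi - lo + 2).toNat
decreasing_by
  · have := PySem.Int.floordiv_two_mid_bounds (show lo ≤ hi by omega)
    simp only [PySem.Int.floordiv] at *
    omega
  · have := PySem.Int.floordiv_two_mid_bounds (show lo ≤ hi by omega)
    simp only [PySem.Int.floordiv] at *
    omega

def solution_alt (n : Int) (s : Int) : String :=
  match solutionGo n s (-1) (n + 1) with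
  | some (t, a) => PySem.Int.toStr t ++ " " ++ PySem.Int.toStr a
  | none => "-1"

-- ===== PRECONDITION & SPEC =====
-- Pre_ excludes exactly n = 0, where A's score divides by 2*n = 0 (ZeroDivisionError).
def Pre_solution (n : Int) (s : Int) : Prop := n ≠ 0
instance (n : Int) (s : Int) : Decidable (Pre_solution n s) := by unfold Pre_solution; infer_instance
def pvWitness_solution : Int × Int := (5, 3)

def Spec_solution (n : Int) (s : Int) (out : String) : Prop := out = solution_alt n s
instance (n : Int) (s : Int) (out : String) : Decidable (Spec_solution n s out) := by unfold Spec_solution; infer_instance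

-- ===== CLAIM (what is proved, stated in full; the proofs are below) =====
def Claim_equal_solution : Prop := ∀ (n : Int) (s : Int), Dom_solution n s → Pre_solution n s → Spec_solution n s (solution n s)

-- ===== LEMMAS AND PROOFS =====

-- score(0, mid, 0, n) reduced: (10^9*(2*mid)) // (2*n) = (10^9*mid) // n
theorem score_m_eq (n mid : Int) :
    score 0 mid 0 n = PySem.Int.floordiv (1000000000 * mid) n := by
  unfold score
  rw [show (10 : Int) ^ 9 * (2 * 0 + 2 * mid + 0) = 2 * (1000000000 * mid) by ring]
  simp [PySem.Int.floordiv, Int.mul_fdiv_mul_of_pos]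

-- score(0, mid-1, 1, n) reduced: (10^9*(2*mid-1)) // (2*n) = (10^9*mid - 5*10^8) // n
theorem score_l_eq (n mid : Int) :
    score 0 (mid - 1) 1 n = PySem.Int.floordiv (1000000000 * mid - 500000000) n := by
  unfold score
  rw [show (10 : Int) ^ 9 * (2 * 0 + 2 * (mid - 1) + 1) = 2 * (1000000000 * mid - 500000000) by ring]
  simp [PySem.Int.floordiv, Int.mul_fdiv_mul_of_pos]

-- the projection relating A's result triple [a, b, c] to B's output pair (2a+2b+c, a)
def outPair : Option (Int × Int × Int) → Option (Int × Int)
  | some (a, b, c) => some (2 * a + 2 * b + c, a)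
  | none => none

-- the two searches walk the same (left, right) trajectory; fuel induction on the interval width
theorem loop_eq_go (n s : Int) : ∀ (k : Nat) (left right : Int),
    (right - left + 2).toNat ≤ k →
    outPair (solutionLoop n s left right) = solutionGo n s left right := by
  intro k
  induction k with
  | zero =>
    intro left right hk
    have h : ¬ left ≤ right := by omega
    rw [solutionLoop, solutionGo]
    simp [h, show left > right by omega, outPair]
  | succ k ih =>
    intro left right hk
    by_cases h : left ≤ right
    · have hm := PySem.Int.floordiv_two_mid_bounds h
      rw [solutionLoop, solutionGo]
      simp only [h, dite_true, show ¬ left > right by omega, dite_false,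
        score_m_eq, score_l_eq]
      split_ifs with h1 h2 h3 h4
      · exact ih _ _ (by omega)
      · exact ih _ _ (by omega)
      · simp only [outPair, Option.some.injEq, Prod.mk.injEq]
        exact ⟨by ring, trivial⟩
      · simp only [outPair, Option.some.injEq, Prod.mk.injEq]
        exact ⟨by ring, trivial⟩
      · simp [outPair]
    · rw [solutionLoop, solutionGo]
      simp [h, show left > right by omega, outPair]

-- ===== VERDICT (by name: the statement is the Claim_ definition above) =====
theorem solution_spec : Claim_equal_solution := by
  intro n s _hd _hn
  unfold Spec_solution solution solution_alt
  rw [← loop_eq_go n s ((n + 1) - (-1) + 2).toNat (-1) (n + 1) (le_refl _)]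
  cases solutionLoop n s (-1) (n + 1) with
  | none => simp [outPair]
  | some r =>
    obtain ⟨a, b, c⟩ := r
    simp [outPair]
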